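-- pv_equiv track=rewrite | github.com/alibusinessali07/Tiktok | tiktok_audio_videos_to_sheets.py | _column_index_to_a1_label
-- ===== SOURCE A (Python) =====
-- from typing import Dict, List, Optional, Tuple, Any, Callable
--
-- def _column_index_to_a1_label(col_idx_0_based: int) -> str:
--     """Convert 0-based column index to A1 column label (0->A, 25->Z, 26->AA)."""
--     if col_idx_0_based < 0:
--         raise ValueError("Column index must be >= 0")
--     n = col_idx_0_based + 1
--     chars: List[str] = []
--     while n > 0:
--         n, rem = divmod(n - 1, 26)
--         chars.append(chr(ord("A") + rem))
--     return "".join(reversed(chars))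
-- ===== SOURCE B (Python) =====
-- def _column_index_to_a1_label(col_idx_0_based: int) -> str:
--     """Convert 0-based column index to A1 column label (0->A, 25->Z, 26->AA)."""
--     if col_idx_0_based < 0:
--         raise ValueError("Column index must be >= 0")
--     # Stage 1: find the label length by peeling off whole blocks of
--     # length-1, length-2, ... labels (block sizes 26, 26**2, ...).
--     n = col_idx_0_based
--     length = 1
--     block = 26
--     while n >= block:
--         n -= block
--         block *= 26
--         length += 1
--     # Stage 2: n is the 0-based offset within the length-`length` block;
--     # write it as a plain fixed-width base-26 numeral.
--     label = ""
--     for _ in range(length):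
--         label = chr(ord("A") + n % 26) + label
--         n //= 26
--     return label
-- ===== Notes on version B (the rewrite author's own statement) =====
-- stated objective: alternative
-- what changed: B is a two-stage algorithm: it first finds the label length by subtracting whole block sizes 26, 26^2, ..., then writes the remaining offset as a fixed-width plain base-26 numeral, instead of A's single divmod(n-1,26) loop with append-and-reverse.
import Mathlib
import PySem

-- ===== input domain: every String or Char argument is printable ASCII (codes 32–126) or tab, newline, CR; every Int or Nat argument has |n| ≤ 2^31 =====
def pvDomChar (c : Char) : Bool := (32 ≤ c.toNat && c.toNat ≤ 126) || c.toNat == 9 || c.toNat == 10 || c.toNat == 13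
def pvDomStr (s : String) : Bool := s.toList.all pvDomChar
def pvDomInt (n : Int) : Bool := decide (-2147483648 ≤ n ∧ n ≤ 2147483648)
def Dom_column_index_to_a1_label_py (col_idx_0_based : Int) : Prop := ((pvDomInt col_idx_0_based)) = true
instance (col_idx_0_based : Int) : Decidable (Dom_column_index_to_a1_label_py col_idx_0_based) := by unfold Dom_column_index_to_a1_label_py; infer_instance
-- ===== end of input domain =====

-- B finds the label length by peeling off block sizes 26, 26^2, ... and then writes the offset
-- as a fixed-width plain base-26 numeral, instead of A's divmod(n-1,26) append-and-reverse loop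
-- (objective: alternative; same cost).

-- ===== PORT A =====
-- while n > 0: n, rem = divmod(n - 1, 26); chars.append(chr(ord("A") + rem))
def pvA_loop (n : Int) (chars : List Char) : List Char :=
  if h : n > 0 then
    pvA_loop (PySem.Int.floordiv (n - 1) 26)
      (chars ++ [Char.ofNat (65 + (PySem.Int.mod (n - 1) 26)).toNat])
  else chars
termination_by n.toNat
decreasing_by
  rw [PySem.Int.floordiv_eq_ediv_of_pos (by omega)]
  have h1 : (n - 1) / 26 ≤ n - 1 := Int.ediv_le_self _ (by omega)
  have h0 : 0 ≤ (n - 1) / 26 := Int.ediv_nonneg (by omega) (by omega)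
  omega

def column_index_to_a1_label_py (col_idx_0_based : Int) : String :=
  if col_idx_0_based < 0 then ""   -- Python raises ValueError here; excluded by Pre_
  else String.ofList (pvA_loop (col_idx_0_based + 1) []).reverse

-- ===== PORT B =====
-- Stage 1: while n >= block: n -= block; block *= 26; length += 1
-- (the '0 < block' conjunct is a totality guard only: every call has block > 0)
def pvB_len (n block : Int) (length : Nat) : Int × Nat :=
  if h : 0 < block ∧ block ≤ n then
    pvB_len (n - block) (block * 26) (length + 1)
  else (n, length)
termination_by n.toNat
decreasing_by omega

-- Stage 2: for _ in range(length): label = chr(ord("A") + n % 26) + label; n //= 26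
def pvB_forloop : Nat → List Char × Int → List Char × Int
  | 0, st => st
  | k + 1, st =>
    pvB_forloop k
      (Char.ofNat (65 + (PySem.Int.mod st.2 26)).toNat :: st.1, PySem.Int.floordiv st.2 26)

def column_index_to_a1_label_py_alt (col_idx_0_based : Int) : String :=
  if col_idx_0_based < 0 then ""   -- Python raises ValueError here; excluded by Pre_
  else
    let r := pvB_len col_idx_0_based 26 1
    String.ofList (pvB_forloop r.2 ([], r.1)).1

-- ===== PRECONDITION & SPEC =====
-- Pre_: Python A raises ValueError exactly when col_idx_0_based < 0.
def Pre_column_index_to_a1_label_py (col_idx_0_based : Int) : Prop := 0 ≤ col_idx_0_based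
instance (col_idx_0_based : Int) : Decidable (Pre_column_index_to_a1_label_py col_idx_0_based) := by unfold Pre_column_index_to_a1_label_py; infer_instance
def pvWitness_column_index_to_a1_label_py : Int := (27)

def Spec_column_index_to_a1_label_py (col_idx_0_based : Int) (out : String) : Prop := out = column_index_to_a1_label_py_alt col_idx_0_based
instance (col_idx_0_based : Int) (out : String) : Decidable (Spec_column_index_to_a1_label_py col_idx_0_based out) := by unfold Spec_column_index_to_a1_label_py; infer_instance

-- ===== CLAIM (what is proved, stated in full; the proofs are below) =====
def Claim_equal_column_index_to_a1_label_py : Prop := ∀ (col_idx_0_based : Int), Dom_column_index_to_a1_label_py col_idx_0_based → Pre_column_index_to_a1_label_py col_idx_0_based → Spec_column_index_to_a1_label_py col_idx_0_based (column_index_to_a1_label_py col_idx_0_based)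

-- ===== LEMMAS AND PROOFS =====

-- Canonical digits of the bijective base-26 numeral of n (most significant first).
def pvR (n : Int) : List Char :=
  if h : n ≤ 0 then []
  else pvR (PySem.Int.floordiv (n - 1) 26)
       ++ [Char.ofNat (65 + (PySem.Int.mod (n - 1) 26)).toNat]
termination_by n.toNat
decreasing_by
  rw [PySem.Int.floordiv_eq_ediv_of_pos (by omega)]
  have h1 : (n - 1) / 26 ≤ n - 1 := Int.ediv_le_self _ (by omega)
  have h0 : 0 ≤ (n - 1) / 26 := Int.ediv_nonneg (by omega) (by omega)
  omega

-- A's loop result, relative to the accumulator, is pvR reversed.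
theorem pvA_loop_eq (n : Int) (chars : List Char) :
    pvA_loop n chars = chars ++ (pvR n).reverse := by
  by_cases h : n > 0
  · rw [pvA_loop, dif_pos h, pvR, dif_neg (by omega : ¬ n ≤ 0)]
    rw [pvA_loop_eq]
    simp [List.append_assoc]
  · rw [pvA_loop, dif_neg h, pvR, dif_pos (by omega : n ≤ 0)]
    simp
termination_by n.toNat
decreasing_by
  rw [PySem.Int.floordiv_eq_ediv_of_pos (by omega)]
  have h1 : (n - 1) / 26 ≤ n - 1 := Int.ediv_le_self _ (by omega)
  have h0 : 0 ≤ (n - 1) / 26 := Int.ediv_nonneg (by omega) (by omega)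
  omega

-- Fixed-width plain base-26 digits of m, most significant first.
def pvDl : Nat → Int → List Char
  | 0, _ => []
  | k + 1, m =>
    pvDl k (PySem.Int.floordiv m 26) ++ [Char.ofNat (65 + (PySem.Int.mod m 26)).toNat]

theorem pvB_forloop_eq (k : Nat) : ∀ (s : List Char) (m : Int),
    (pvB_forloop k (s, m)).1 = pvDl k m ++ s := by
  induction k with
  | zero => intro s m; simp [pvB_forloop, pvDl]
  | succ k ih =>
    intro s m
    rw [pvB_forloop, ih, pvDl]
    simp [List.append_assoc]

-- T L = 1 + 26 + … + 26^(L-1), the first index (1-based) of a length-L label.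
def pvT : Nat → Int
  | 0 => 0
  | L + 1 => 1 + 26 * pvT L

theorem pvT_succ (L : Nat) : pvT (L + 1) = 1 + 26 * pvT L := rfl

theorem pvT_succ' (L : Nat) : pvT (L + 1) = pvT L + 26 ^ L := by
  induction L with
  | zero => simp [pvT]
  | succ L ih =>
    have ih' : 1 + 26 * pvT L = pvT L + 26 ^ L := by rw [← pvT_succ]; exact ih
    rw [pvT_succ (L + 1), ih, pow_succ]
    linarith [ih']

theorem pvT_nonneg (L : Nat) : 0 ≤ pvT L := by
  induction L with
  | zero => simp [pvT]
  | succ L ih => rw [pvT_succ]; omega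

-- The fixed-width numeral of the offset m equals the bijective numeral of m + T L.
theorem pvDl_eq_pvR (L : Nat) : ∀ m : Int, 0 ≤ m → m < 26 ^ L →
    pvDl L m = pvR (m + pvT L) := by
  induction L with
  | zero =>
    intro m h0 h1
    have h1' : m < 1 := by simpa using h1
    have : m = 0 := by omega
    subst this
    rw [pvR, dif_pos (by simp [pvT])]
    rfl
  | succ L ih =>
    intro m h0 h1
    have hT : 0 ≤ pvT L := pvT_nonneg L
    have hpos : ¬ (m + pvT (L + 1) ≤ 0) := by rw [pvT_succ]; omega
    rw [pvR, dif_neg hpos]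
    have harg : m + pvT (L + 1) - 1 = m + pvT L * 26 := by rw [pvT_succ]; ring
    rw [harg]
    rw [PySem.Int.floordiv_eq_ediv_of_pos (by omega), PySem.Int.mod_eq_emod_of_pos (by omega)]
    have hdiv : (m + pvT L * 26) / 26 = m / 26 + pvT L := by omega
    have hmod : (m + pvT L * 26) % 26 = m % 26 := by omega
    rw [hdiv, hmod]
    rw [pvDl, PySem.Int.floordiv_eq_ediv_of_pos (by omega), PySem.Int.mod_eq_emod_of_pos (by omega)]
    rw [ih (m / 26) (Int.ediv_nonneg h0 (by omega))
        (by
          have : m < 26 ^ L * 26 := by rw [pow_succ] at h1; omega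
          omega)]
  
-- Stage-1 invariant: the quantity (n + T length) is preserved, and the loop exits
-- with 0 ≤ n < 26 ^ length.
theorem pvB_len_spec (n : Int) (hn : 0 ≤ n) (L : Nat) :
    (pvB_len n (26 ^ L) L).1 + pvT (pvB_len n (26 ^ L) L).2 = n + pvT L ∧
    0 ≤ (pvB_len n (26 ^ L) L).1 ∧
    (pvB_len n (26 ^ L) L).1 < 26 ^ (pvB_len n (26 ^ L) L).2 := by
  have hb : (0:Int) < 26 ^ L := by positivity
  by_cases h : (26:Int) ^ L ≤ n
  · rw [pvB_len, dif_pos ⟨hb, h⟩]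
    have hstep : (26:Int) ^ L * 26 = 26 ^ (L + 1) := by rw [pow_succ]
    rw [hstep]
    have ih := pvB_len_spec (n - 26 ^ L) (by omega) (L + 1)
    refine ⟨?_, ih.2.1, ih.2.2⟩
    rw [ih.1, pvT_succ']
    ring
  · rw [pvB_len, dif_neg (by tauto)]
    refine ⟨rfl, hn, ?_⟩
    show n < 26 ^ L
    omega
termination_by n.toNat
decreasing_by
  have : (0:Int) < 26 ^ L := by positivity
  omega

-- ===== VERDICT (by name: the statement is the Claim_ definition above) =====
theorem column_index_to_a1_label_py_spec : Claim_equal_column_index_to_a1_label_py := by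
  intro i _ hpre
  unfold Spec_column_index_to_a1_label_py column_index_to_a1_label_py column_index_to_a1_label_py_alt
  have hn : ¬ i < 0 := by unfold Pre_column_index_to_a1_label_py at hpre; omega
  rw [if_neg hn, if_neg hn, pvA_loop_eq]
  have hspec := pvB_len_spec i hpre 1
  rw [(by norm_num : (26:Int) ^ 1 = 26)] at hspec
  have h1 : pvT 1 = 1 := by simp [pvT]
  rw [h1] at hspec
  simp only [pvB_forloop_eq, List.append_nil]
  rw [pvDl_eq_pvR _ _ hspec.2.1 hspec.2.2, hspec.1]
  simp
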